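-- pv_equiv track=rewrite | github.com/diecasfranco/scripts | demultiplex2024_07_13.py | get_longest_hit
-- ===== SOURCE A (Python) =====
-- def get_longest_hit(loc):
--     '''
--     If searching for dual barcodes with ligation, it is best to search for the single
--     barcode without ligation and also for the dual barcode.  If the ligation was not perfect,
--     a pcr fragment with single barcode can be ligated to an other pcr fragment with dual barcode.
--     This filters out the longest hit.
--     '''
--     for l in range(0, len(loc)-1):
--         for m in range(l+1, len(loc)):
--             for i, k in enumerate(loc[l]):
--                 for n in loc[m]:
--                     z = set(k)
--                     z = set([x for x in z if x != ''])
--                     z.update(set(n))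
--                     if len(z) != 4:
--                         z = list(z)
--                         z.sort()
--                         loc[l][i] = ('','')
--     loc = [[y] for x in loc for y in x if y != ('','')]
--     return loc
-- ===== SOURCE B (Python) =====
-- def get_longest_hit(loc):
--     # One right-to-left pass: summarize all later tuples with a value-set and two
--     # flags, so each tuple is tested in O(1) instead of against every later tuple.
--     # (Unlike A, this does not mutate the input lists; return value is identical.)
--     kept_rev = []
--     seen = set()        # values occurring in tuples of later lists
--     any_later = False   # some later list has a tuple
--     any_dup = False     # some later tuple (c, d) has c == d
--     for lst in reversed(loc):
--         kept = []
--         for (a, b) in lst: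
--             if (a, b) == ('', ''):
--                 continue
--             marked = (any_later and (a == b or a == '' or b == '')) \
--                      or any_dup or a in seen or b in seen
--             if not marked:
--                 kept.append([(a, b)])
--         kept_rev.append(kept)
--         for (c, d) in lst:
--             any_later = True
--             if c == d:
--                 any_dup = True
--             seen.add(c)
--             seen.add(d)
--     out = []
--     for kept in reversed(kept_rev):
--         out += kept
--     return out
-- ===== Notes on version B (the rewrite author's own statement) =====
-- stated objective: faster
-- what changed: Replaces A's all-pairs scan of every tuple against every tuple of every later list (with set arithmetic per pair and in-place marking) by a single right-to-left pass that summarizes later tuples in a value set plus two flags, deciding each tuple in O(1).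
import Mathlib
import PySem

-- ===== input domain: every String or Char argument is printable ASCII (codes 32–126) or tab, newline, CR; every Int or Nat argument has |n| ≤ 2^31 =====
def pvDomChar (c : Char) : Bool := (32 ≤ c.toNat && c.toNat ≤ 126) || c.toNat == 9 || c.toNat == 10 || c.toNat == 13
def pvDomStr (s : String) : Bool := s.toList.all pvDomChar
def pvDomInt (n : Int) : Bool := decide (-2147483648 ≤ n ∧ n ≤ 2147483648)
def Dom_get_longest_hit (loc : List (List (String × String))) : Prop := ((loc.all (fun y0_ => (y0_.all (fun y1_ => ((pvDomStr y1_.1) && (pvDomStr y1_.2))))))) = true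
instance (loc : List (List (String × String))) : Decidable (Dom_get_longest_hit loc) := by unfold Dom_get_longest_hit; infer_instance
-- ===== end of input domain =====

-- B replaces A's all-pairs scan by one right-to-left pass over a value-set summary of the
-- later tuples (same return value; unlike A, B does not mutate the input lists in place).

-- ===== PORT A =====
def get_longest_hit (loc : List (List (String × String))) : List (List (String × String)) :=
  let loc1 := (PySem.List.pyRange 0 (PySem.List.len loc - 1) 1).foldl (fun st l =>
    (PySem.List.pyRange (l + 1) (PySem.List.len st) 1).foldl (fun st m =>
      let ll := PySem.List.pyGetD st l []
      let lm := PySem.List.pyGetD st m []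
      let ll' := (PySem.List.enumerate ll).foldl (fun ll ik =>
        lm.foldl (fun ll n =>
          let z := PySem.Set.ofList [ik.2.1, ik.2.2]
          let z := PySem.Set.ofList (z.filter (fun x => x ≠ ""))
          let z := PySem.Set.update z (PySem.Set.ofList [n.1, n.2])
          if PySem.Set.len z ≠ 4 then
            let _zsorted := PySem.List.sorted z (fun x => x) false  -- z = list(z); z.sort() (unused, as in A)
            ll.set ik.1.toNat ("", "")  -- loc[l][i] = ('',''): i from enumerate is ≥ 0 and in range
          else ll) ll) ll
      st.set l.toNat ll') st) loc
  loc1.flatMap (fun x => (x.filter (fun y => y ≠ ("", ""))).map (fun y => [y]))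

-- ===== PORT B =====
def get_longest_hit_alt (loc : List (List (String × String))) : List (List (String × String)) :=
  let st := loc.reverse.foldl
    (fun (st : List (List (List (String × String))) × PySem.Set String × Bool × Bool) lst =>
      let keptRev := st.1
      let seen := st.2.1
      let anyLater := st.2.2.1
      let anyDup := st.2.2.2
      let kept := lst.foldl (fun kept ab =>
        if ab = ("", "") then kept
        else
          let marked := (anyLater && (ab.1 == ab.2 || ab.1 == "" || ab.2 == "")) || anyDup
            || PySem.Set.contains seen ab.1 || PySem.Set.contains seen ab.2
          if marked then kept else kept ++ [[ab]]) []
      let keptRev := keptRev ++ [kept]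
      let fl := lst.foldl (fun (s : PySem.Set String × Bool × Bool) cd =>
        (PySem.Set.add (PySem.Set.add s.1 cd.1) cd.2, true,
          if cd.1 = cd.2 then true else s.2.2)) (seen, anyLater, anyDup)
      (keptRev, fl)) ([], PySem.Set.empty, false, false)
  (st.1.reverse).foldl (fun out kept => out ++ kept) []

-- ===== PRECONDITION & SPEC =====
def Spec_get_longest_hit (loc : List (List (String × String))) (out : List (List (String × String))) : Prop := out = get_longest_hit_alt loc
instance (loc : List (List (String × String))) (out : List (List (String × String))) : Decidable (Spec_get_longest_hit loc out) := by unfold Spec_get_longest_hit; infer_instance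

-- ===== CLAIM (what is proved, stated in full; the proofs are below) =====
def Claim_equal_get_longest_hit : Prop := ∀ (loc : List (List (String × String))), Dom_get_longest_hit loc → Spec_get_longest_hit loc (get_longest_hit loc)

-- ===== LEMMAS AND PROOFS =====

-- A's per-pair test, as the port computes it (set arithmetic) and as B tests it (comparisons)
def pvBadA (k n : String × String) : Bool :=
  decide (PySem.Set.len (PySem.Set.update (PySem.Set.ofList
    ((PySem.Set.ofList [k.1, k.2]).filter (fun x => x ≠ "")))
    (PySem.Set.ofList [n.1, n.2])) ≠ 4)

def pvBadB (k n : String × String) : Bool :=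
  k.1 == k.2 || k.1 == "" || k.2 == "" || n.1 == n.2 ||
  n.1 == k.1 || n.1 == k.2 || n.2 == k.1 || n.2 == k.2

lemma pvBadA_eq_pvBadB (k n : String × String) : pvBadA k n = pvBadB k n := by
  obtain ⟨a, b⟩ := k
  obtain ⟨c, d⟩ := n
  by_cases ha : a = "" <;> by_cases hb : b = "" <;> subst_vars <;>
    simp_all [pvBadA, pvBadB, PySem.Set.ofList, PySem.Set.update, PySem.Set.add,
      PySem.Set.len, PySem.Set.contains, PySem.Set.empty, List.foldl] <;>
    split_ifs <;> simp_all [PySem.Set.add, PySem.Set.contains] <;>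
    split_ifs <;> simp_all <;> try tauto

-- marking one tuple against a pool of later tuples (A's view)
def pvG (T : List (String × String)) (k : String × String) : String × String :=
  if T.any (fun n => pvBadA k n) then ("", "") else k

def pvMarkAll : List (List (String × String)) → List (List (String × String))
  | [] => []
  | h :: t => h.map (pvG t.flatten) :: pvMarkAll t

-- the common specification: keep a tuple iff it is not ('','') and no later tuple clashes
def pvKeep (x S : List (String × String)) : List (List (String × String)) :=
  (x.filter (fun ab => ab ≠ ("", "") && !(S.any (fun n => pvBadB ab n)))).map (fun y => [y])

def pvKeepAll : List (List (String × String)) → List (List (String × String))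
  | [] => []
  | h :: t => pvKeep h t.flatten ++ pvKeepAll t

-- B's per-list results in processing order (S = tuples already seen, i.e. later lists)
def pvKepts : List (List (String × String)) → List (String × String) → List (List (List (String × String)))
  | [], _ => []
  | x :: r, S => pvKeep x S :: pvKepts r (S ++ x)

-- ---- A-side lemmas ----

lemma pvG_nil (k : String × String) : pvG [] k = k := by
  simp [pvG]

lemma pvG_pvG (T1 T2 : List (String × String)) (k : String × String) :
    pvG T2 (pvG T1 k) = pvG (T1 ++ T2) k := by
  unfold pvG
  by_cases h1 : (T1.any (fun n => pvBadA k n)) = true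
  · simp [h1, List.any_append]
  · rw [if_neg h1]
    rw [List.any_append]
    rw [Bool.not_eq_true] at h1
    rw [h1]
    simp only [Bool.false_or]

-- the n-loop: mark index i iff some n in lm clashes with k
lemma pv_inner_n (k : String × String) (i : Nat) :
    ∀ (lm ll : List (String × String)),
      lm.foldl (fun ll n => if pvBadA k n = true then ll.set i ("", "") else ll) ll
        = if lm.any (fun n => pvBadA k n) then ll.set i ("", "") else ll := by
  intro lm
  induction lm with
  | nil => simp
  | cons n lm ih =>
    intro ll
    by_cases h : pvBadA k n = true
    · simp [h, ih, List.set_set]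
    · rw [Bool.not_eq_true] at h
      rw [List.foldl_cons, List.any_cons, h]
      simp only [Bool.false_eq_true, if_false, Bool.false_or]
      rw [ih]

-- the enumerate loop: per-index marking is a map
lemma pv_enum_fold (f : (String × String) → Bool) :
    ∀ (xs pre : List (String × String)),
      (PySem.List.enumerate xs (pre.length : Int)).foldl
          (fun ll ik => if f ik.2 then ll.set ik.1.toNat ("", "") else ll) (pre ++ xs)
        = pre ++ xs.map (fun k => if f k then ("", "") else k) := by
  intro xs
  induction xs with
  | nil => simp [PySem.List.enumerate]
  | cons x xs ih =>
    intro pre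
    rw [PySem.List.enumerate_cons, List.foldl_cons]
    have hset : ((pre ++ x :: xs).set pre.length ("", "")) = pre ++ ("", "") :: xs := by
      rw [List.set_append_right _ _ (Nat.le_refl _)]
      simp
    have h1 : ∀ v : String × String, ((pre.length : Int) + 1) = (((pre ++ [v]).length : Int)) := by
      intro v; simp
    by_cases h : f x = true
    · simp only [h, if_true, Int.toNat_natCast]
      rw [hset, show pre ++ ("", "") :: xs = (pre ++ [("", "")]) ++ xs by simp, h1 ("", ""),
        ih (pre ++ [("", "")])]
      simp [h]
    · simp only [h, if_false, Bool.false_eq_true]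
      rw [show pre ++ x :: xs = (pre ++ [x]) ++ xs by simp, h1 x, ih (pre ++ [x])]
      simp [h]

-- the m-loop over an arbitrary list of indices > l
lemma pv_getD_set_self {α : Type} (st : List α) (l : Nat) (v : α) (d : α) (hl : l < st.length) :
    (st.set l v).getD l d = v := by
  simp [List.getD, hl]

lemma pv_getD_set_ne {α : Type} (st : List α) (l m : Nat) (v : α) (d : α) (h : l ≠ m) :
    (st.set l v).getD m d = st.getD m d := by
  simp [List.getD, List.getElem?_set_ne, h]

lemma pv_mloop (l : Nat) :
    ∀ (ms : List Int) (st : List (List (String × String))),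
      (∀ m ∈ ms, (l : Int) < m) →
      ms.foldl (fun st m =>
          st.set l ((PySem.List.pyGetD st (l : Int) []).map (pvG (PySem.List.pyGetD st m [])))) st
        = st.set l ((PySem.List.pyGetD st (l : Int) []).map
            (pvG (ms.flatMap (fun m => PySem.List.pyGetD st m [])))) := by
  intro ms
  induction ms with
  | nil =>
    intro st _
    simp only [List.foldl_nil, List.flatMap_nil]
    by_cases hl : l < st.length
    · have : (PySem.List.pyGetD st (l : Int) []).map (pvG []) = PySem.List.pyGetD st (l : Int) [] := by
        apply List.map_id''
        intro k
        simp [pvG]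
      rw [this, PySem.List.pyGetD_natCast]
      have h2 := List.set_getElem_self (as := st) (i := l) hl
      simp only [List.getD, List.getElem?_eq_getElem, hl, Option.getD_some]
      exact h2.symm
    · rw [List.set_eq_of_length_le (by omega)]
  | cons m ms ih =>
    intro st hms
    have hlm : (l : Int) < m := hms m List.mem_cons_self
    have hm0 : (0 : Int) ≤ m := by omega
    set ll := PySem.List.pyGetD st (l : Int) [] with hll
    set lm := PySem.List.pyGetD st (m : Int) [] with hlm2
    rw [List.foldl_cons, ih _ (fun m' hm' => hms m' (List.mem_cons_of_mem _ hm'))]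
    set st' := st.set l (ll.map (pvG lm)) with hst'
    have hget_l : PySem.List.pyGetD st' (l : Int) [] = ll.map (pvG lm) := by
      by_cases hl : l < st.length
      · rw [PySem.List.pyGetD_natCast, hst', pv_getD_set_self _ _ _ _ hl]
      · rw [hst', List.set_eq_of_length_le (by omega)]
        rw [hll, PySem.List.pyGetD_natCast]
        rw [List.getD_eq_default _ _ (by omega)]
        simp
    have hget_ne : ∀ m' : Int, (l : Int) < m' → PySem.List.pyGetD st' m' [] = PySem.List.pyGetD st m' [] := by
      intro m' hm'
      rw [PySem.List.pyGetD_of_nonneg _ _ (by omega), PySem.List.pyGetD_of_nonneg _ _ (by omega),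
        hst', pv_getD_set_ne _ _ _ _ _ (by omega)]
    have hflat : ms.flatMap (fun m' => PySem.List.pyGetD st' m' []) = ms.flatMap (fun m' => PySem.List.pyGetD st m' []) := by
      rw [List.flatMap_def, List.flatMap_def]
      congr 1
      apply List.map_congr_left
      intro m' hm'
      exact hget_ne m' (hms m' (List.mem_cons_of_mem _ hm'))
    rw [hget_l, hflat, hst', List.set_set, List.map_map]
    congr 1
    apply List.map_congr_left
    intro k _
    simp only [Function.comp]
    rw [pvG_pvG]
    rw [List.flatMap_cons, ← hlm2]


-- the literal outer-loop body of port A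
def pvStepA (st : List (List (String × String))) (l : Int) : List (List (String × String)) :=
  (PySem.List.pyRange (l + 1) (PySem.List.len st) 1).foldl (fun st m =>
    let ll := PySem.List.pyGetD st l []
    let lm := PySem.List.pyGetD st m []
    let ll' := (PySem.List.enumerate ll).foldl (fun ll ik =>
      lm.foldl (fun ll n =>
        let z := PySem.Set.ofList [ik.2.1, ik.2.2]
        let z := PySem.Set.ofList (z.filter (fun x => x ≠ ""))
        let z := PySem.Set.update z (PySem.Set.ofList [n.1, n.2])
        if PySem.Set.len z ≠ 4 then
          let _zsorted := PySem.List.sorted z (fun x => x) false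
          ll.set ik.1.toNat ("", "")
        else ll) ll) ll
    st.set l.toNat ll') st

lemma pv_pyRange_nil {a b : Int} (h : b ≤ a) : PySem.List.pyRange a b 1 = [] := by
  apply List.eq_nil_iff_forall_not_mem.mpr
  intro x hx
  have := PySem.List.mem_pyRange_one.mp hx
  omega

-- one outer-loop step, at a nonnegative index l = pre.length inside the state pre ++ x :: rest
lemma pv_stepA_char (pre rest : List (List (String × String))) (x : List (String × String)) :
    pvStepA (pre ++ x :: rest) (pre.length : Int)
      = pre ++ (x.map (pvG rest.flatten)) :: rest := by
  set st0 := pre ++ x :: rest with hst0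
  have hfun : (fun (st : List (List (String × String))) (m : Int) =>
      let ll := PySem.List.pyGetD st (pre.length : Int) []
      let lm := PySem.List.pyGetD st m []
      let ll' := (PySem.List.enumerate ll).foldl (fun ll ik =>
        lm.foldl (fun ll n =>
          let z := PySem.Set.ofList [ik.2.1, ik.2.2]
          let z := PySem.Set.ofList (z.filter (fun x => x ≠ ""))
          let z := PySem.Set.update z (PySem.Set.ofList [n.1, n.2])
          if PySem.Set.len z ≠ 4 then
            let _zsorted := PySem.List.sorted z (fun x => x) false
            ll.set ik.1.toNat ("", "")
          else ll) ll) ll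
      st.set (pre.length : Int).toNat ll')
      = (fun st m => st.set pre.length ((PySem.List.pyGetD st (pre.length : Int) []).map
          (pvG (PySem.List.pyGetD st m [])))) := by
    funext st m
    dsimp only
    set ll := PySem.List.pyGetD st (pre.length : Int) [] with hll
    set lm := PySem.List.pyGetD st m [] with hlm
    have hinner : (fun (ll : List (String × String)) (ik : Int × (String × String)) =>
        lm.foldl (fun ll n =>
          let z := PySem.Set.ofList [ik.2.1, ik.2.2]
          let z := PySem.Set.ofList (z.filter (fun x => x ≠ ""))
          let z := PySem.Set.update z (PySem.Set.ofList [n.1, n.2])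
          if PySem.Set.len z ≠ 4 then
            let _zsorted := PySem.List.sorted z (fun x => x) false
            ll.set ik.1.toNat ("", "")
          else ll) ll)
        = (fun ll ik => if (lm.any fun n => pvBadA ik.2 n) then ll.set ik.1.toNat ("", "") else ll) := by
      funext ll ik
      have hcond : (fun (ll : List (String × String)) (n : String × String) =>
          let z := PySem.Set.ofList [ik.2.1, ik.2.2]
          let z := PySem.Set.ofList (z.filter (fun x => x ≠ ""))
          let z := PySem.Set.update z (PySem.Set.ofList [n.1, n.2])
          if PySem.Set.len z ≠ 4 then
            let _zsorted := PySem.List.sorted z (fun x => x) false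
            ll.set ik.1.toNat ("", "")
          else ll)
          = (fun ll n => if pvBadA ik.2 n = true then ll.set ik.1.toNat ("", "") else ll) := by
        funext ll n
        simp only [pvBadA, decide_eq_true_eq]
      rw [hcond, pv_inner_n]
    rw [hinner]
    have henum := pv_enum_fold (fun k => lm.any fun n => pvBadA k n) ll []
    simp only [List.nil_append, List.length_nil, Nat.cast_zero] at henum
    rw [henum, Int.toNat_natCast]
    rfl
  show (PySem.List.pyRange ((pre.length : Int) + 1) (PySem.List.len st0) 1).foldl _ st0 = _
  rw [hfun, pv_mloop pre.length _ st0 (by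
    intro m hm
    have := PySem.List.mem_pyRange_one.mp hm
    omega)]
  have hget : PySem.List.pyGetD st0 (pre.length : Int) [] = x := by
    rw [PySem.List.pyGetD_natCast, hst0, List.getD_eq_getElem?_getD,
      List.getElem?_append_right (Nat.le_refl _)]
    simp
  have hflat : (PySem.List.pyRange ((pre.length : Int) + 1) (PySem.List.len st0) 1).flatMap
      (fun m => PySem.List.pyGetD st0 m []) = rest.flatten := by
    rw [List.flatMap_def, PySem.List.len_eq,
      show ((pre.length : Int) + 1) = ((pre.length + 1 : Nat) : Int) by push_cast; ring,
      PySem.List.map_pyGetD_pyRange' st0 [] (by positivity)]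
    congr 1
    rw [Int.toNat_natCast, hst0, show pre ++ x :: rest = (pre ++ [x]) ++ rest by simp,
      List.drop_left' (by simp)]
  rw [hget, hflat, hst0, List.set_append_right _ _ (Nat.le_refl _)]
  simp


-- the whole l-loop marks every list against the flatten of the lists after it
lemma pv_lloop :
    ∀ (rest pre : List (List (String × String))),
      (PySem.List.pyRange (pre.length : Int) (((pre ++ rest).length : Int) - 1) 1).foldl
          pvStepA (pre ++ rest)
        = pre ++ pvMarkAll rest := by
  intro rest
  induction rest with
  | nil =>
    intro pre
    rw [pv_pyRange_nil (by simp only [List.append_nil]; omega)]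
    simp [pvMarkAll]
  | cons x rest ih =>
    intro pre
    match rest with
    | [] =>
      rw [pv_pyRange_nil (by simp)]
      have hx : List.map (pvG []) x = x := by
        apply List.map_id''
        intro k
        exact pvG_nil k
      simp [pvMarkAll, hx]
    | y :: rest' =>
      rw [PySem.List.pyRange_one_cons (by simp; omega), List.foldl_cons, pv_stepA_char]
      have hlen : ((pre.length : Int) + 1) = (((pre ++ [x.map (pvG (y :: rest').flatten)]).length : Int)) := by
        simp
      have happ : pre ++ (x.map (pvG (y :: rest').flatten)) :: (y :: rest')
          = (pre ++ [x.map (pvG (y :: rest').flatten)]) ++ (y :: rest') := by simp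
      rw [happ, hlen, show ((pre ++ x :: y :: rest').length : Int) - 1
            = (((pre ++ [x.map (pvG (y :: rest').flatten)]) ++ (y :: rest')).length : Int) - 1 by simp,
        ih (pre ++ [x.map (pvG (y :: rest').flatten)])]
      simp [pvMarkAll]

lemma pv_A_char (loc : List (List (String × String))) :
    get_longest_hit loc
      = (pvMarkAll loc).flatMap (fun x => (x.filter (fun y => y ≠ ("", ""))).map (fun y => [y])) := by
  have h0 : get_longest_hit loc
      = ((PySem.List.pyRange 0 (PySem.List.len loc - 1) 1).foldl pvStepA loc).flatMap
          (fun x => (x.filter (fun y => y ≠ ("", ""))).map (fun y => [y])) := rfl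
  rw [h0]
  have := pv_lloop loc []
  simp only [List.nil_append, List.length_nil, Nat.cast_zero] at this
  rw [PySem.List.len_eq, this]


lemma pv_any_AB (T : List (String × String)) (k : String × String) :
    (T.any fun n => pvBadA k n) = (T.any fun n => pvBadB k n) := by
  induction T with
  | nil => rfl
  | cons n T ih => simp [List.any_cons, pvBadA_eq_pvBadB]

lemma pv_row (T h : List (String × String)) :
    ((h.map (pvG T)).filter (fun y => y ≠ ("", ""))).map (fun y => [y]) = pvKeep h T := by
  induction h with
  | nil => simp [pvKeep]
  | cons k h ih =>
    simp only [List.map_cons, pvG, pvKeep, List.filter_cons, ne_eq] at *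
    simp only [decide_not] at ih
    rw [pv_any_AB]
    by_cases hAny : (T.any fun n => pvBadB k n) = true
    · simp [hAny, ih]
    · rw [Bool.not_eq_true] at hAny
      by_cases hk : k = ("", "")
      · simp [hk, ih]
      · simp [hAny, hk, ih]

lemma pv_A_keepAll (loc : List (List (String × String))) :
    get_longest_hit loc = pvKeepAll loc := by
  rw [pv_A_char]
  induction loc with
  | nil => rfl
  | cons h t ih => simp only [pvMarkAll, pvKeepAll, List.flatMap_cons, pv_row, ih]

-- ---- B-side lemmas ----

def pvInv (S : List (String × String)) (seen : PySem.Set String) (aL aD : Bool) : Prop :=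
  (∀ v, v ∈ seen ↔ ∃ n ∈ S, n.1 = v ∨ n.2 = v) ∧ aL = S.any (fun _ => true) ∧ aD = S.any (fun n => n.1 == n.2)

lemma pv_keep_congr (x S S' : List (String × String)) (h : ∀ n, n ∈ S ↔ n ∈ S') :
    pvKeep x S = pvKeep x S' := by
  unfold pvKeep
  congr 1
  apply List.filter_congr
  intro ab _
  have : (S.any fun n => pvBadB ab n) = (S'.any fun n => pvBadB ab n) := by
    rw [Bool.eq_iff_iff]
    simp only [List.any_eq_true]
    constructor
    · rintro ⟨n, hn, hb⟩; exact ⟨n, (h n).mp hn, hb⟩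
    · rintro ⟨n, hn, hb⟩; exact ⟨n, (h n).mpr hn, hb⟩
  rw [this]

lemma pv_marked_char (S : List (String × String)) (seen : PySem.Set String) (aL aD : Bool)
    (hinv : pvInv S seen aL aD) (ab : String × String) :
    ((aL && (ab.1 == ab.2 || ab.1 == "" || ab.2 == "")) || aD
      || PySem.Set.contains seen ab.1 || PySem.Set.contains seen ab.2)
      = S.any (fun n => pvBadB ab n) := by
  obtain ⟨hseen, haL, haD⟩ := hinv
  rw [Bool.eq_iff_iff]
  subst haL haD
  simp only [Bool.or_eq_true, Bool.and_eq_true, beq_iff_eq, List.any_eq_true,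
    pvBadB, PySem.Set.contains_iff, hseen]
  constructor
  · rintro (((⟨⟨n, hn, -⟩, hdeg⟩ | ⟨n, hn, hd⟩) | ⟨n, hn, h⟩) | ⟨n, hn, h⟩)
    · exact ⟨n, hn, by tauto⟩
    · exact ⟨n, hn, by tauto⟩
    · exact ⟨n, hn, by tauto⟩
    · exact ⟨n, hn, by tauto⟩
  · rintro ⟨n, hn, hbig⟩
    rcases hbig with (((((((h | h) | h) | h) | h) | h) | h) | h)
    · exact Or.inl (Or.inl (Or.inl ⟨⟨n, hn, trivial⟩, by tauto⟩))
    · exact Or.inl (Or.inl (Or.inl ⟨⟨n, hn, trivial⟩, by tauto⟩))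
    · exact Or.inl (Or.inl (Or.inl ⟨⟨n, hn, trivial⟩, by tauto⟩))
    · exact Or.inl (Or.inl (Or.inr ⟨n, hn, h⟩))
    · exact Or.inl (Or.inr ⟨n, hn, Or.inl h⟩)
    · exact Or.inr ⟨n, hn, Or.inl h⟩
    · exact Or.inl (Or.inr ⟨n, hn, Or.inr h⟩)
    · exact Or.inr ⟨n, hn, Or.inr h⟩

lemma pv_kept_row (lst S : List (String × String)) (seen : PySem.Set String) (aL aD : Bool)
    (hinv : pvInv S seen aL aD) :
    lst.foldl (fun kept ab =>
      if ab = ("", "") then kept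
      else
        let marked := (aL && (ab.1 == ab.2 || ab.1 == "" || ab.2 == "")) || aD
          || PySem.Set.contains seen ab.1 || PySem.Set.contains seen ab.2
        if marked then kept else kept ++ [[ab]]) []
      = pvKeep lst S := by
  have hfun : (fun (kept : List (List (String × String))) (ab : String × String) =>
      if ab = ("", "") then kept
      else
        let marked := (aL && (ab.1 == ab.2 || ab.1 == "" || ab.2 == "")) || aD
          || PySem.Set.contains seen ab.1 || PySem.Set.contains seen ab.2
        if marked then kept else kept ++ [[ab]])
      = (fun kept ab =>
        if (decide (ab ≠ ("", "")) && !(S.any fun n => pvBadB ab n)) = true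
        then kept ++ [(fun y => [y]) ab] else kept) := by
    funext kept ab
    dsimp only
    rw [pv_marked_char S seen aL aD hinv ab]
    by_cases hab : ab = ("", "")
    · simp [hab]
    · by_cases hAny : (S.any fun n => pvBadB ab n) = true
      · simp [hab, hAny]
      · rw [Bool.not_eq_true] at hAny
        simp [hab, hAny]
  rw [hfun, PySem.List.foldl_append_if]
  simp [pvKeep]

lemma pv_upd :
    ∀ (lst S : List (String × String)) (seen : PySem.Set String) (aL aD : Bool),
      pvInv S seen aL aD →
      pvInv (S ++ lst)
        (lst.foldl (fun (s : PySem.Set String × Bool × Bool) cd =>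
          (PySem.Set.add (PySem.Set.add s.1 cd.1) cd.2, true,
            if cd.1 = cd.2 then true else s.2.2)) (seen, aL, aD)).1
        (lst.foldl (fun (s : PySem.Set String × Bool × Bool) cd =>
          (PySem.Set.add (PySem.Set.add s.1 cd.1) cd.2, true,
            if cd.1 = cd.2 then true else s.2.2)) (seen, aL, aD)).2.1
        (lst.foldl (fun (s : PySem.Set String × Bool × Bool) cd =>
          (PySem.Set.add (PySem.Set.add s.1 cd.1) cd.2, true,
            if cd.1 = cd.2 then true else s.2.2)) (seen, aL, aD)).2.2 := by
  intro lst
  induction lst with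
  | nil =>
    intro S seen aL aD hinv
    simpa using hinv
  | cons cd lst ih =>
    intro S seen aL aD hinv
    obtain ⟨hseen, haL, haD⟩ := hinv
    simp only [List.foldl_cons]
    have hinv' : pvInv (S ++ [cd]) (PySem.Set.add (PySem.Set.add seen cd.1) cd.2) true
        (if cd.1 = cd.2 then true else aD) := by
      refine ⟨?_, ?_, ?_⟩
      · intro v
        simp only [PySem.Set.mem_add, hseen, List.mem_append, List.mem_singleton]
        constructor
        · rintro ((⟨n, hn, h⟩ | h) | h)
          · exact ⟨n, Or.inl hn, h⟩
          · exact ⟨cd, Or.inr rfl, Or.inl h.symm⟩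
          · exact ⟨cd, Or.inr rfl, Or.inr h.symm⟩
        · rintro ⟨n, hn | hn, h⟩
          · exact Or.inl (Or.inl ⟨n, hn, h⟩)
          · subst hn
            rcases h with h | h
            · exact Or.inl (Or.inr h.symm)
            · exact Or.inr h.symm
      · simp [List.any_append]
      · subst haD
        by_cases hcd : cd.1 = cd.2
        · simp [hcd]
        · simp [hcd, List.any_append]
    have := ih (S ++ [cd]) _ _ _ hinv'
    simpa [List.append_assoc] using this

lemma pv_B_fold :
    ∀ (r : List (List (String × String)))
      (acc : List (List (List (String × String)))) (seen : PySem.Set String) (aL aD : Bool)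
      (S : List (String × String)), pvInv S seen aL aD →
      (r.foldl
        (fun (st : List (List (List (String × String))) × PySem.Set String × Bool × Bool) lst =>
          let keptRev := st.1
          let seen := st.2.1
          let anyLater := st.2.2.1
          let anyDup := st.2.2.2
          let kept := lst.foldl (fun kept ab =>
            if ab = ("", "") then kept
            else
              let marked := (anyLater && (ab.1 == ab.2 || ab.1 == "" || ab.2 == "")) || anyDup
                || PySem.Set.contains seen ab.1 || PySem.Set.contains seen ab.2
              if marked then kept else kept ++ [[ab]]) []
          let keptRev := keptRev ++ [kept]
          let fl := lst.foldl (fun (s : PySem.Set String × Bool × Bool) cd =>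
            (PySem.Set.add (PySem.Set.add s.1 cd.1) cd.2, true,
              if cd.1 = cd.2 then true else s.2.2)) (seen, anyLater, anyDup)
          (keptRev, fl)) (acc, seen, aL, aD)).1
        = acc ++ pvKepts r S := by
  intro r
  induction r with
  | nil =>
    intro acc seen aL aD S _
    simp [pvKepts]
  | cons lst r ih =>
    intro acc seen aL aD S hinv
    rw [List.foldl_cons]
    dsimp only
    rw [pv_kept_row lst S seen aL aD hinv]
    have hupd := pv_upd lst S seen aL aD hinv
    rw [ih _ _ _ _ _ hupd]
    simp [pvKepts, List.append_assoc]

lemma pv_kepts_append (h : List (String × String)) :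
    ∀ (r : List (List (String × String))) (S : List (String × String)),
      pvKepts (r ++ [h]) S = pvKepts r S ++ [pvKeep h (S ++ r.flatten)] := by
  intro r
  induction r with
  | nil =>
    intro S
    simp [pvKepts]
  | cons x r ih =>
    intro S
    simp only [List.cons_append, pvKepts, ih (S ++ x), List.flatten_cons, List.append_assoc]

lemma pv_foldl_append {α : Type} :
    ∀ (L : List (List α)) (acc : List α), L.foldl (fun out kept => out ++ kept) acc = acc ++ L.flatten := by
  intro L
  induction L with
  | nil => simp
  | cons x L ih =>
    intro acc
    simp [ih, List.append_assoc]

lemma pv_rev_keepAll (loc : List (List (String × String))) :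
    (pvKepts loc.reverse []).reverse.flatten = pvKeepAll loc := by
  induction loc with
  | nil => rfl
  | cons h t ih =>
    rw [List.reverse_cons, pv_kepts_append h t.reverse [], List.reverse_append]
    simp only [List.reverse_cons, List.reverse_nil, List.nil_append, List.flatten_append,
      List.flatten_cons, List.flatten_nil, List.append_nil, pvKeepAll]
    rw [ih, pv_keep_congr h (t.reverse.flatten) t.flatten (by
      intro n
      simp [List.mem_flatten, List.mem_reverse])]

lemma pv_B_keepAll (loc : List (List (String × String))) :
    get_longest_hit_alt loc = pvKeepAll loc := by
  unfold get_longest_hit_alt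
  dsimp only
  rw [pv_B_fold loc.reverse [] PySem.Set.empty false false [] (by
    refine ⟨?_, ?_, ?_⟩
    · intro v
      simp [PySem.Set.empty]
    · simp
    · simp)]
  rw [List.nil_append, pv_foldl_append, List.nil_append, pv_rev_keepAll]

-- ===== VERDICT (by name: the statement is the Claim_ definition above) =====
theorem get_longest_hit_spec : Claim_equal_get_longest_hit := by
  intro loc _
  unfold Spec_get_longest_hit
  rw [pv_A_keepAll, pv_B_keepAll]
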